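-- pv_equiv track=rewrite | github.com/Megha31Solanki/My-Python-Code | findNonrepeater.py | find_non_repeating
-- ===== SOURCE A (Python) =====
-- def find_non_repeating(arr):
--     freq = {}
--     result = []
--
--     for i in arr:
--         freq[i] = freq.get(i, 0) + 1
--
--     for i in arr:
--         if freq[i] == 1:
--             result.append(i)
--
--     return result
-- ===== SOURCE B (Python) =====
-- def find_non_repeating(arr):
--     seen = set()
--     result = []
--     for x in arr:
--         if x in seen:
--             if x in result:
--                 result.remove(x)
--         else:
--             seen.add(x)
--             result.append(x)
--     return result
-- ===== Notes on version B (the rewrite author's own statement) =====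
-- stated objective: alternative
-- what changed: B replaces A's count-table-then-filter two-pass with a single online pass that optimistically appends each first occurrence and deletes an element from the result the moment a repeat of it is seen, tracking only a seen-set.
import Mathlib
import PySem

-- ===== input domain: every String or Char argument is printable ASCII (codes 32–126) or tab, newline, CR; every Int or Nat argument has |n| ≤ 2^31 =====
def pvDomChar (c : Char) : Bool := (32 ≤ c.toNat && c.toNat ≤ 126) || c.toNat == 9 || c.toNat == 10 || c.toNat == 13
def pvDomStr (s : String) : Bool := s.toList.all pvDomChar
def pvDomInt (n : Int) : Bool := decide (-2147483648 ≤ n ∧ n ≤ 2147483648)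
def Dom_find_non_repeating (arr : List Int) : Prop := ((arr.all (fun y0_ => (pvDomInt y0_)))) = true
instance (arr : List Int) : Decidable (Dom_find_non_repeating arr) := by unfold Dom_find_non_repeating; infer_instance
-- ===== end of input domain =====

-- B replaces A's count-table-then-filter two passes with one online pass: append each first
-- occurrence optimistically, delete an element from the result when a repeat of it is seen.
-- ===== PORT A =====
-- freq[i] is ported as getD i 0: every i looked up was inserted by the first loop, so KeyError is unreachable.
def find_non_repeating (arr : List Int) : List Int :=
  let freq := arr.foldl (fun d i => d.insert i (d.getD i 0 + 1)) (PySem.Dict.empty : PySem.Dict Int Int)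
  arr.foldl (fun result i => if freq.getD i 0 == 1 then result ++ [i] else result) []

-- ===== PORT B =====
-- result.remove(x) is guarded by 'x in result', so remove? is some there; getD is only a totality guard.
def find_non_repeating_alt (arr : List Int) : List Int :=
  (arr.foldl
    (fun (st : PySem.Set Int × List Int) x =>
      if PySem.Set.contains st.1 x then
        if st.2.contains x then (st.1, (PySem.List.remove? st.2 x).getD st.2)
        else st
      else (PySem.Set.add st.1 x, st.2 ++ [x]))
    ((PySem.Set.empty : PySem.Set Int), ([] : List Int))).2

-- ===== PRECONDITION & SPEC =====
def Spec_find_non_repeating (arr : List Int) (out : List Int) : Prop := out = find_non_repeating_alt arr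
instance (arr : List Int) (out : List Int) : Decidable (Spec_find_non_repeating arr out) := by unfold Spec_find_non_repeating; infer_instance

-- ===== CLAIM (what is proved, stated in full; the proofs are below) =====
def Claim_equal_find_non_repeating : Prop := ∀ (arr : List Int), Dom_find_non_repeating arr → Spec_find_non_repeating arr (find_non_repeating arr)

-- ===== LEMMAS AND PROOFS =====

-- Erasing the (unique) occurrence of x from a filter is filtering with x switched off.
lemma erase_filter_switch (x : Int) : ∀ (l : List Int) (P Q : Int → Bool),
    (∀ y ∈ l, y ≠ x → P y = Q y) → Q x = false → l.count x ≤ 1 →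
    (l.filter P).erase x = l.filter Q := by
  intro l
  induction l with
  | nil => intro P Q _ _ _; simp
  | cons a l ih =>
    intro P Q hpq hq hcnt
    by_cases hax : a = x
    · subst hax
      have hl0 : l.count a = 0 := by
        have hcc : (a :: l).count a = l.count a + 1 := by simp
        omega
      have hnx : a ∉ l := List.count_eq_zero.mp hl0
      have hfl : l.filter P = l.filter Q := by
        apply List.filter_congr
        intro y hy
        exact hpq y (List.mem_cons_of_mem _ hy) (fun h => hnx (h ▸ hy))
      by_cases hp : P a
      · simp [hp, hq, List.erase_cons_head, hfl]
      · have hnf : a ∉ l.filter P := fun h => hnx (List.mem_of_mem_filter h)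
        simp [hp, hq, hfl]
    · have hPa : P a = Q a := hpq a (List.mem_cons_self) hax
      have hcnt' : l.count x ≤ 1 := by
        have hcc : (a :: l).count x = l.count x := by simp [hax]
        omega
      have ih' := ih P Q (fun y hy => hpq y (List.mem_cons_of_mem _ hy)) hq hcnt'
      by_cases hp : P a
      · have hq' : Q a = true := hPa ▸ hp
        rw [List.filter_cons_of_pos (by simp [hp]), List.filter_cons_of_pos (by simp [hq']),
          List.erase_cons_tail (by simp [hax]), ih']
      · have hq' : Q a = false := by rw [← hPa]; simpa using hp
        simp [hp, hq', ih']

-- Loop invariant of B's single pass: after consuming a prefix p, seen = set(p) and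
-- result = the elements occurring exactly once in p, in order.
lemma b_loop_inv : ∀ (rest p : List Int),
    (rest.foldl
      (fun (st : PySem.Set Int × List Int) x =>
        if PySem.Set.contains st.1 x then
          if st.2.contains x then (st.1, (PySem.List.remove? st.2 x).getD st.2)
          else st
        else (PySem.Set.add st.1 x, st.2 ++ [x]))
      (PySem.Set.ofList p, p.filter (fun y => p.count y == 1))).2
    = (p ++ rest).filter (fun y => (p ++ rest).count y == 1) := by
  intro rest
  induction rest with
  | nil => intro p; simp
  | cons x rest ih =>
    intro p
    rw [List.foldl_cons]
    have hcount_ne : ∀ y ∈ p, y ≠ x →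
        ((p.count y == 1) = ((p ++ [x]).count y == 1)) := by
      intro y _ hyx
      simp [List.count_append, Ne.symm hyx]
    have hstep :
        (if PySem.Set.contains (PySem.Set.ofList p) x then
          if (p.filter (fun y => p.count y == 1)).contains x then
            (PySem.Set.ofList p,
              (PySem.List.remove? (p.filter (fun y => p.count y == 1)) x).getD
                (p.filter (fun y => p.count y == 1)))
          else (PySem.Set.ofList p, p.filter (fun y => p.count y == 1))
        else (PySem.Set.add (PySem.Set.ofList p) x,
              p.filter (fun y => p.count y == 1) ++ [x]))
        = (PySem.Set.ofList (p ++ [x]), (p ++ [x]).filter (fun y => (p ++ [x]).count y == 1)) := by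
      by_cases hx : x ∈ p
      · have hseen : PySem.Set.contains (PySem.Set.ofList p) x = true := by
          simp [PySem.Set.mem_ofList, hx]
        have hset : PySem.Set.ofList (p ++ [x]) = PySem.Set.ofList p := by
          simp only [PySem.Set.ofList_eq_foldl, List.foldl_append, List.foldl_cons, List.foldl_nil]
          rw [← PySem.Set.ofList_eq_foldl]
          simp [PySem.Set.add, PySem.Set.mem_ofList, hx]
        have hcx : ((p ++ [x]).count x == 1) = false := by
          have h1 : 1 ≤ p.count x := List.one_le_count_iff.mpr hx
          simp [List.count_append]
          omega
        have hfilt_app : (p ++ [x]).filter (fun y => (p ++ [x]).count y == 1)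
            = p.filter (fun y => (p ++ [x]).count y == 1) := by
          have h1 : 1 ≤ p.count x := List.one_le_count_iff.mpr hx
          simp [List.filter_append]
          omega
        by_cases hc : p.count x = 1
        · have hmem : x ∈ p.filter (fun y => p.count y == 1) := by
            simp [List.mem_filter, hx, hc]
          have hcontains : (p.filter (fun y => p.count y == 1)).contains x = true := by
            simpa using hmem
          have hrem := PySem.List.remove?_eq_some_erase _ x hmem
          rw [hseen, hcontains]
          simp only [if_true, hrem, Option.getD_some]
          rw [hset, hfilt_app]
          refine Prod.ext rfl ?_
          exact erase_filter_switch x p _ _ hcount_ne hcx (by omega)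
        · have hnmem : x ∉ p.filter (fun y => p.count y == 1) := by
            simp [List.mem_filter, hc]
          have hcontains : (p.filter (fun y => p.count y == 1)).contains x = false := by
            simpa using hnmem
          rw [hseen, hcontains]
          simp only [Bool.false_eq_true, if_false, if_true]
          rw [hset, hfilt_app]
          refine Prod.ext rfl ?_
          apply List.filter_congr
          intro y hy
          by_cases hyx : y = x
          · subst hyx
            have h1 : 1 ≤ p.count y := List.one_le_count_iff.mpr hy
            simp [List.count_append]
            omega
          · exact hcount_ne y hy hyx
      · have hseen : PySem.Set.contains (PySem.Set.ofList p) x = false := by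
          simp [PySem.Set.mem_ofList, hx]
        rw [hseen]
        simp only [Bool.false_eq_true, if_false]
        have hset : PySem.Set.add (PySem.Set.ofList p) x = PySem.Set.ofList (p ++ [x]) := by
          simp only [PySem.Set.ofList_eq_foldl, List.foldl_append, List.foldl_cons, List.foldl_nil]
        have h0 : p.count x = 0 := List.count_eq_zero.mpr hx
        have hcx : ((p ++ [x]).count x == 1) = true := by
          simp [List.count_append, h0]
        refine Prod.ext hset ?_
        have hfilt : p.filter (fun y => p.count y == 1)
            = p.filter (fun y => (p ++ [x]).count y == 1) := by
          apply List.filter_congr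
          intro y hy
          exact hcount_ne y hy (fun h => hx (h ▸ hy))
        rw [hfilt, List.filter_append]
        simp [h0]
    rw [hstep, ih (p ++ [x])]
    simp

-- ===== VERDICT (by name: the statement is the Claim_ definition above) =====
theorem find_non_repeating_spec : Claim_equal_find_non_repeating := by
  intro arr _
  unfold Spec_find_non_repeating find_non_repeating find_non_repeating_alt
  have hA : arr.foldl
      (fun result i =>
        if (arr.foldl (fun d i => d.insert i (d.getD i 0 + 1))
              (PySem.Dict.empty : PySem.Dict Int Int)).getD i 0 == 1
        then result ++ [i] else result) []
      = arr.filter (fun y => arr.count y == 1) := by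
    rw [PySem.List.foldl_append_if_eq_filter]
    simp only [List.nil_append]
    apply List.filter_congr
    intro y _
    rw [PySem.Dict.getD_foldl_insert_add_one]
    simp [PySem.Dict.getD_empty, Nat.cast_eq_one]
  have hB := b_loop_inv arr []
  simp only [List.nil_append, List.filter_nil] at hB
  rw [hA]
  exact hB.symm
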